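-- pv_equiv track=rewrite | github.com/cmkds/algo | SWEA/0916_5688_세제곱근을 찾아라/5688.py | hol
-- ===== SOURCE A (Python) =====
-- def hol(n,a,b):
--     if a==0:
--         for i in range(10**(a//3),10**(b//3),2):
--             if n == i**3:
--                 return i
--         return -1
--     else:
--         for i in range(10**(a//3)+1,10**(b//3),2):
--             if n == i**3:
--                 return i
--         return -1
-- ===== SOURCE B (Python) =====
-- def hol(n, a, b):
--     # Direct integer cube root + bound/parity checks instead of scanning the range.
--     if n <= 0:
--         return -1
--     lo, hi = 0, n
--     while lo < hi:
--         mid = (lo + hi + 1) // 2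
--         if mid ** 3 <= n:
--             lo = mid
--         else:
--             hi = mid - 1
--     r = lo
--     if r ** 3 != n:
--         return -1
--     j = a // 3
--     k = b // 3
--     # d = number of decimal digits of r (r >= 1)
--     d = 0
--     t = r
--     while t > 0:
--         t //= 10
--         d += 1
--     if d > k:          # r >= 10**k: at or above the stop bound
--         return -1
--     if d <= j:         # r < 10**j: below the start bound
--         return -1
--     start = 10 ** j + (0 if a == 0 else 1)
--     if r < start or (r - start) % 2 != 0:
--         return -1
--     return r
-- ===== Notes on version B (the rewrite author's own statement) =====
-- stated objective: faster
-- what changed: Replaces A's linear scan of the step-2 range [10^(a//3)(+1), 10^(b//3)) testing i**3 == n with a binary-search integer cube root of n followed by O(1) bound and parity checks (the bound r < 10^(b//3) is decided via r's decimal digit count, so no huge power of ten is built); intended as faster: a timing run measured B 31.6x at the largest size both finished and A timing out on larger inputs, but could not fully confirm the label.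
import Mathlib
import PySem

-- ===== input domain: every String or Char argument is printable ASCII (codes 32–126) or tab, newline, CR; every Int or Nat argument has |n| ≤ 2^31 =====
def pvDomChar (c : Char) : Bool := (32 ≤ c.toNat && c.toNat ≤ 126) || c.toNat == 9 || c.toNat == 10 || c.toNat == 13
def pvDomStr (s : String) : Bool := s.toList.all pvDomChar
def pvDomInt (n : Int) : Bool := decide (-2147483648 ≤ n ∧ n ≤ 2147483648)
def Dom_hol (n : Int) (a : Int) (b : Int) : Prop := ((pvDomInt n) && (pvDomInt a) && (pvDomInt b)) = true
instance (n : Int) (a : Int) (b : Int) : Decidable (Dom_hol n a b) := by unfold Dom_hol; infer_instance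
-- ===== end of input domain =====

-- B replaces A's linear scan of a step-2 range with a binary-search integer cube
-- root plus O(1) bound/parity checks (intended as faster; a timing run measured
-- B 31.6x at the largest size both finished, with A timing out beyond it, but could
-- not fully confirm the label).


-- ===== PORT A =====
-- Literal port of A.  Python's 10**(a//3) / 10**(b//3) are ported as
-- 10 ^ (floordiv _ 3).toNat, exact on Pre_hol (where a//3 ≥ 0 and b//3 ≥ 0);
-- for a negative exponent Python produces a float and range raises TypeError,
-- which Pre_hol excludes.  `for i in range(start, stop, 2): if n == i**3: return i`
-- is the tail-recursive scan holScanA (range is lazy; i goes start, start+2, …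
-- while i < stop, returning at the first hit, else -1).
def holScanA (n cur stop : Int) : Int :=
  if cur < stop then
    if n == cur ^ 3 then cur else holScanA n (cur + 2) stop
  else -1
termination_by (stop - cur).toNat
decreasing_by omega

def hol (n : Int) (a : Int) (b : Int) : Int :=
  if a == 0 then
    holScanA n ((10:Int) ^ (PySem.Int.floordiv a 3).toNat)
      ((10:Int) ^ (PySem.Int.floordiv b 3).toNat)
  else
    holScanA n ((10:Int) ^ (PySem.Int.floordiv a 3).toNat + 1)
      ((10:Int) ^ (PySem.Int.floordiv b 3).toNat)

-- ===== PORT B =====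
-- binary-search integer cube root: Python's `while lo < hi` loop from Source B
def holIcbrtLoop (n lo hi : Int) : Int :=
  if lo < hi then
    let mid := PySem.Int.floordiv (lo + hi + 1) 2
    if mid ^ 3 ≤ n then holIcbrtLoop n mid hi else holIcbrtLoop n lo (mid - 1)
  else lo
termination_by (hi - lo).toNat
decreasing_by
  · rw [PySem.Int.floordiv_eq_ediv_of_pos (by norm_num : (0:Int) < 2)]
    omega
  · rw [PySem.Int.floordiv_eq_ediv_of_pos (by norm_num : (0:Int) < 2)]
    omega

-- decimal digit count: Python's `while t > 0: t //= 10; d += 1` loop from Source B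
def holNdigitsLoop (t d : Int) : Int :=
  if 0 < t then holNdigitsLoop (PySem.Int.floordiv t 10) (d + 1) else d
termination_by t.toNat
decreasing_by
  rw [PySem.Int.floordiv_eq_ediv_of_pos (by norm_num : (0:Int) < 10)]
  omega

-- Literal port of B (Source B); 10 ** j ported as 10 ^ j.toNat, exact on Pre_hol (j ≥ 0).
def hol_alt (n : Int) (a : Int) (b : Int) : Int :=
  if n ≤ 0 then -1
  else
    let r := holIcbrtLoop n 0 n
    if r ^ 3 != n then -1
    else
      let j := PySem.Int.floordiv a 3
      let k := PySem.Int.floordiv b 3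
      let d := holNdigitsLoop r 0
      if d > k then -1
      else if d ≤ j then -1
      else
        let start := (10:Int) ^ j.toNat + (if a == 0 then 0 else 1)
        if r < start || PySem.Int.mod (r - start) 2 != 0 then -1 else r

-- ===== PRECONDITION & SPEC =====
-- Pre_hol excludes exactly the inputs where A raises: for a < 0 or b < 0,
-- Python's 10**(a//3) or 10**(b//3) is a float and range(...) raises TypeError.
def Pre_hol (n : Int) (a : Int) (b : Int) : Prop := 0 ≤ a ∧ 0 ≤ b
instance (n : Int) (a : Int) (b : Int) : Decidable (Pre_hol n a b) := by unfold Pre_hol; infer_instance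

def pvWitness_hol : Int × Int × Int := (27, 0, 3)

def Spec_hol (n : Int) (a : Int) (b : Int) (out : Int) : Prop := out = hol_alt n a b
instance (n : Int) (a : Int) (b : Int) (out : Int) : Decidable (Spec_hol n a b out) := by unfold Spec_hol; infer_instance

-- ===== CLAIM (what is proved, stated in full; the proofs are below) =====
def Claim_equal_hol : Prop := ∀ (n : Int) (a : Int) (b : Int), Dom_hol n a b → Pre_hol n a b → Spec_hol n a b (hol n a b)

-- ===== LEMMAS AND PROOFS =====

-- cubes are strictly monotone on ℤ
theorem pvCube_lt_cube {x y : Int} (h : x < y) : x ^ 3 < y ^ 3 := by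
  nlinarith [sq_nonneg (x + y), sq_nonneg x, sq_nonneg y, sq_nonneg (x - y)]

theorem pvCube_inj {x y : Int} (h : x ^ 3 = y ^ 3) : x = y := by
  rcases lt_trichotomy x y with hlt | he | hgt
  · exact absurd h (ne_of_lt (pvCube_lt_cube hlt))
  · exact he
  · exact absurd h.symm (ne_of_lt (pvCube_lt_cube hgt))

-- invariant of the cube-root binary search
theorem holIcbrtLoop_spec (n lo hi : Int) (h0 : 0 ≤ lo) (h1 : lo ≤ hi)
    (h2 : lo ^ 3 ≤ n) (h3 : n < (hi + 1) ^ 3) :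
    0 ≤ holIcbrtLoop n lo hi ∧ (holIcbrtLoop n lo hi) ^ 3 ≤ n ∧
      n < (holIcbrtLoop n lo hi + 1) ^ 3 := by
  rw [holIcbrtLoop]
  by_cases h : lo < hi
  · simp only [h, if_true]
    have hm : PySem.Int.floordiv (lo + hi + 1) 2 = (lo + hi + 1) / 2 :=
      PySem.Int.floordiv_eq_ediv_of_pos (by norm_num)
    have hlo : lo + 1 ≤ PySem.Int.floordiv (lo + hi + 1) 2 := by rw [hm]; omega
    have hhi : PySem.Int.floordiv (lo + hi + 1) 2 ≤ hi := by rw [hm]; omega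
    set mid := PySem.Int.floordiv (lo + hi + 1) 2 with hmid
    by_cases hc : mid ^ 3 ≤ n
    · simp only [hc, if_true]
      exact holIcbrtLoop_spec n mid hi (by omega) hhi hc h3
    · simp only [hc, if_false]
      have : n < (mid - 1 + 1) ^ 3 := by simpa using (lt_of_not_ge hc)
      exact holIcbrtLoop_spec n lo (mid - 1) h0 (by omega) h2 this
  · simp only [h, if_false]
    have : lo = hi := le_antisymm h1 (le_of_not_gt h)
    exact ⟨h0, h2, this ▸ h3⟩
termination_by (hi - lo).toNat
decreasing_by
  · omega
  · omega

-- cubes: ≤-monotonicity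
theorem pvCube_le_cube {x y : Int} (h : x ≤ y) : x ^ 3 ≤ y ^ 3 := by
  rcases eq_or_lt_of_le h with rfl | hlt
  · exact le_refl _
  · exact le_of_lt (pvCube_lt_cube hlt)

-- accumulator shift for the digit-count loop
theorem holNdigits_shift (t d : Int) :
    holNdigitsLoop t d = holNdigitsLoop t 0 + d := by
  rw [holNdigitsLoop]
  conv_rhs => rw [holNdigitsLoop]
  by_cases h : 0 < t
  · simp only [h, if_true]
    have hq : PySem.Int.floordiv t 10 = t / 10 :=
      PySem.Int.floordiv_eq_ediv_of_pos (by norm_num)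
    rw [holNdigits_shift (PySem.Int.floordiv t 10) (d + 1),
        holNdigits_shift (PySem.Int.floordiv t 10) (0 + 1)]
    ring
  · simp only [h, if_false]
    omega
termination_by t.toNat
decreasing_by
  · rw [hq]; omega
  · rw [hq]; omega

-- digit-count spec: 10^(d-1) ≤ r < 10^d
theorem holNdigits_spec (r : Int) (hr : 0 ≤ r) :
    0 ≤ holNdigitsLoop r 0 ∧ r < 10 ^ (holNdigitsLoop r 0).toNat ∧
      (0 < r → 1 ≤ holNdigitsLoop r 0 ∧ 10 ^ ((holNdigitsLoop r 0).toNat - 1) ≤ r) := by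
  rw [holNdigitsLoop]
  by_cases h : 0 < r
  · simp only [h, if_true]
    have hq : PySem.Int.floordiv r 10 = r / 10 :=
      PySem.Int.floordiv_eq_ediv_of_pos (by norm_num)
    have hq0 : 0 ≤ PySem.Int.floordiv r 10 := by rw [hq]; omega
    obtain ⟨ihN, ihub, ihlb⟩ := holNdigits_spec (PySem.Int.floordiv r 10) hq0
    rw [holNdigits_shift (PySem.Int.floordiv r 10) (0 + 1)]
    set N := holNdigitsLoop (PySem.Int.floordiv r 10) 0 with hN
    have htn : (N + (0 + 1)).toNat = N.toNat + 1 := by omega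
    refine ⟨by omega, ?_, fun _ => ⟨by omega, ?_⟩⟩
    · rw [htn, pow_succ]
      have hp : (0:Int) < 10 ^ N.toNat := by positivity
      rw [hq] at ihub
      omega
    · rw [htn]
      simp only [Nat.add_sub_cancel]
      by_cases hqz : 0 < PySem.Int.floordiv r 10
      · obtain ⟨hN1, hlow⟩ := ihlb hqz
        have he : N.toNat = (N.toNat - 1) + 1 := by omega
        rw [he, pow_succ]
        have : 10 * PySem.Int.floordiv r 10 ≤ r := by rw [hq]; omega
        nlinarith
      · have hq0' : PySem.Int.floordiv r 10 = 0 := by omega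
        have hNz : N = 0 := by rw [hN, hq0', holNdigitsLoop]; simp
        rw [hNz]
        simpa using h
  · simp only [h, if_false]
    have : r = 0 := by omega
    simp [this]
termination_by r.toNat
decreasing_by
  rw [PySem.Int.floordiv_eq_ediv_of_pos (by norm_num : (0:Int) < 10)]
  omega

-- r < 10^e iff the digit count is ≤ e (for r > 0)
theorem pvLtPow10_iff (r : Int) (hr : 0 < r) (e : Nat) :
    r < 10 ^ e ↔ holNdigitsLoop r 0 ≤ (e : Int) := by
  obtain ⟨hN0, hub, hlb⟩ := holNdigits_spec r hr.le
  obtain ⟨hN1, hlow⟩ := hlb hr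
  constructor
  · intro h
    by_contra hc
    push_neg at hc
    have he : e ≤ (holNdigitsLoop r 0).toNat - 1 := by omega
    have := pow_le_pow_right₀ (by norm_num : (1:Int) ≤ 10) he
    linarith
  · intro h
    have he : (holNdigitsLoop r 0).toNat ≤ e := by omega
    exact lt_of_lt_of_le hub (pow_le_pow_right₀ (by norm_num) he)

-- both branches of A are the same scan, with start 10^(a//3) + (0 or 1)
theorem holA_eq (n a b : Int) :
    hol n a b =
      holScanA n ((10:Int) ^ (PySem.Int.floordiv a 3).toNat + (if a == 0 then 0 else 1))
        ((10:Int) ^ (PySem.Int.floordiv b 3).toNat) := by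
  unfold hol
  by_cases hae : a = 0 <;> simp [hae]

-- the scan finds i when i is the (unique) cube root of n and lies in the scan set
theorem holScanA_pos (n cur stop i : Int) (hi3 : i ^ 3 = n) (h1 : cur ≤ i)
    (h2 : i < stop) (h4 : (2:Int) ∣ i - cur) : holScanA n cur stop = i := by
  rw [holScanA, if_pos (by omega)]
  by_cases hc : cur = i
  · subst hc
    rw [if_pos (by simp [hi3])]
  · have hne : ¬ (n == cur ^ 3) = true := by
      simp only [beq_iff_eq]
      intro he
      exact hc (pvCube_inj (by rw [hi3, he]))
    rw [if_neg hne]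
    exact holScanA_pos n (cur + 2) stop i hi3 (by omega) h2 (by omega)
termination_by (stop - cur).toNat
decreasing_by omega

-- the scan returns -1 when no cube root of n lies in the scan set
theorem holScanA_neg (n cur stop : Int)
    (h : ∀ i : Int, i ^ 3 = n → ¬(cur ≤ i ∧ i < stop ∧ (2:Int) ∣ i - cur)) :
    holScanA n cur stop = -1 := by
  rw [holScanA]
  by_cases hlt : cur < stop
  · rw [if_pos hlt]
    have hne : ¬ (n == cur ^ 3) = true := by
      simp only [beq_iff_eq]
      intro he
      exact h cur he.symm ⟨le_refl _, hlt, by omega⟩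
    rw [if_neg hne]
    refine holScanA_neg n (cur + 2) stop ?_
    intro i hi3 hc
    obtain ⟨hc1, hc2, hc3⟩ := hc
    exact h i hi3 ⟨by omega, hc2, by omega⟩
  · rw [if_neg hlt]
termination_by (stop - cur).toNat
decreasing_by omega

-- B returns i when i is the cube root of n and lies in A's scan set
theorem holAlt_eq_pos (n a b i : Int) (ha : 0 ≤ a) (hb : 0 ≤ b) (hi3 : i ^ 3 = n)
    (h1 : (10:Int) ^ (PySem.Int.floordiv a 3).toNat + (if a == 0 then 0 else 1) ≤ i)
    (h2 : i < (10:Int) ^ (PySem.Int.floordiv b 3).toNat)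
    (h4 : (2:Int) ∣ i - ((10:Int) ^ (PySem.Int.floordiv a 3).toNat + (if a == 0 then 0 else 1))) :
    hol_alt n a b = i := by
  have hj : PySem.Int.floordiv a 3 = a / 3 := PySem.Int.floordiv_eq_ediv_of_pos (by norm_num)
  have hk : PySem.Int.floordiv b 3 = b / 3 := PySem.Int.floordiv_eq_ediv_of_pos (by norm_num)
  have hj0 : 0 ≤ PySem.Int.floordiv a 3 := by rw [hj]; omega
  have hk0 : 0 ≤ PySem.Int.floordiv b 3 := by rw [hk]; omega
  have hpj : (1:Int) ≤ 10 ^ (PySem.Int.floordiv a 3).toNat := one_le_pow₀ (by norm_num)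
  have hi1 : 1 ≤ i := by
    refine le_trans ?_ h1
    by_cases hae : a = 0 <;> simp [hae]
  have hi3pos : (1:Int) ≤ i ^ 3 := one_le_pow₀ hi1
  have hn : 0 < n := by omega
  have hself : n + 1 ≤ (n + 1) ^ 3 := le_self_pow₀ (by omega) (by norm_num)
  obtain ⟨hr0, hrub, hrlb⟩ := holIcbrtLoop_spec n 0 n (le_refl 0) (by omega)
    (by simpa using hn.le) (by omega)
  set r := holIcbrtLoop n 0 n with hrdef
  have hri : r = i := by
    by_contra hne
    rcases lt_or_gt_of_ne hne with hlt | hgt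
    · have : (r + 1) ^ 3 ≤ i ^ 3 := pvCube_le_cube (by omega)
      omega
    · have : i ^ 3 < r ^ 3 := pvCube_lt_cube hgt
      omega
  have hrpos : 0 < r := by omega
  have hge : (10:Int) ^ (PySem.Int.floordiv a 3).toNat ≤ r := by
    rw [hri]
    refine le_trans ?_ h1
    by_cases hae : a = 0 <;> simp [hae]
  have hdk : holNdigitsLoop r 0 ≤ PySem.Int.floordiv b 3 := by
    have h2' : r < (10:Int) ^ (PySem.Int.floordiv b 3).toNat := by rw [hri]; exact h2
    have hle := (pvLtPow10_iff r hrpos (PySem.Int.floordiv b 3).toNat).mp h2'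
    omega
  have hdj : PySem.Int.floordiv a 3 < holNdigitsLoop r 0 := by
    by_contra hc
    push_neg at hc
    have : r < (10:Int) ^ (PySem.Int.floordiv a 3).toNat :=
      (pvLtPow10_iff r hrpos (PySem.Int.floordiv a 3).toNat).mpr (by omega)
    omega
  have hmod : PySem.Int.mod (r - ((10:Int) ^ (PySem.Int.floordiv a 3).toNat +
      (if a == 0 then 0 else 1))) 2 = 0 := by
    rw [PySem.Int.mod_eq_zero_iff_dvd, hri]; exact h4
  simp only [hol_alt]
  rw [if_neg (by omega), ← hrdef]
  rw [if_neg (by simp [hri, hi3])]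
  rw [if_neg (by omega)]
  rw [if_neg (by omega)]
  rw [if_neg (by
    simp only [Bool.or_eq_true, decide_eq_true_eq, bne_iff_ne, ne_eq, not_or, not_lt,
      Decidable.not_not]
    exact ⟨by rw [hri]; exact h1, hmod⟩)]
  exact hri

-- B returns -1 when no cube root of n lies in A's scan set
theorem holAlt_eq_neg (n a b : Int) (ha : 0 ≤ a) (hb : 0 ≤ b)
    (h : ∀ i : Int, i ^ 3 = n →
      ¬((10:Int) ^ (PySem.Int.floordiv a 3).toNat + (if a == 0 then 0 else 1) ≤ i ∧
        i < (10:Int) ^ (PySem.Int.floordiv b 3).toNat ∧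
        (2:Int) ∣ i - ((10:Int) ^ (PySem.Int.floordiv a 3).toNat + (if a == 0 then 0 else 1)))) :
    hol_alt n a b = -1 := by
  have hj : PySem.Int.floordiv a 3 = a / 3 := PySem.Int.floordiv_eq_ediv_of_pos (by norm_num)
  have hk : PySem.Int.floordiv b 3 = b / 3 := PySem.Int.floordiv_eq_ediv_of_pos (by norm_num)
  have hj0 : 0 ≤ PySem.Int.floordiv a 3 := by rw [hj]; omega
  have hk0 : 0 ≤ PySem.Int.floordiv b 3 := by rw [hk]; omega
  simp only [hol_alt]
  by_cases hn : n ≤ 0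
  · simp [hn]
  rw [if_neg hn]
  push_neg at hn
  have hself : n + 1 ≤ (n + 1) ^ 3 := le_self_pow₀ (by omega) (by norm_num)
  obtain ⟨hr0, hrub, hrlb⟩ := holIcbrtLoop_spec n 0 n (le_refl 0) (by omega)
    (by simpa using hn.le) (by omega)
  set r := holIcbrtLoop n 0 n with hrdef
  by_cases hr3 : r ^ 3 = n
  case neg => simp [hr3]
  rw [if_neg (by simp [hr3])]
  have hrpos : 0 < r := by nlinarith
  have hnc := h r hr3
  by_cases hdk : PySem.Int.floordiv b 3 < holNdigitsLoop r 0
  · rw [if_pos hdk]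
  rw [if_neg hdk]
  push_neg at hdk
  have hrstop : r < (10:Int) ^ (PySem.Int.floordiv b 3).toNat :=
    (pvLtPow10_iff r hrpos (PySem.Int.floordiv b 3).toNat).mpr (by omega)
  by_cases hdj : holNdigitsLoop r 0 ≤ PySem.Int.floordiv a 3
  · rw [if_pos hdj]
  rw [if_neg hdj]
  push_neg at hdj
  have hrge : (10:Int) ^ (PySem.Int.floordiv a 3).toNat ≤ r := by
    by_contra hc
    push_neg at hc
    have := (pvLtPow10_iff r hrpos (PySem.Int.floordiv a 3).toNat).mp hc
    omega
  by_cases hg : (r < (10:Int) ^ (PySem.Int.floordiv a 3).toNat + (if a == 0 then 0 else 1) ||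
      PySem.Int.mod (r - ((10:Int) ^ (PySem.Int.floordiv a 3).toNat +
        (if a == 0 then 0 else 1))) 2 != 0) = true
  · rw [if_pos hg]
  rw [if_neg hg]
  exfalso
  simp only [Bool.or_eq_true, decide_eq_true_eq, bne_iff_ne, ne_eq, not_or, not_lt,
    Decidable.not_not] at hg
  obtain ⟨hge', hmod⟩ := hg
  exact hnc ⟨hge', hrstop, (PySem.Int.mod_eq_zero_iff_dvd _ _).mp hmod⟩

-- ===== VERDICT (by name: the statement is the Claim_ definition above) =====
theorem hol_spec : Claim_equal_hol := by
  intro n a b _ hpre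
  obtain ⟨ha, hb⟩ := hpre
  unfold Spec_hol
  rw [holA_eq]
  set st : Int := (10:Int) ^ (PySem.Int.floordiv a 3).toNat + (if a == 0 then 0 else 1) with hstdef
  set stp : Int := (10:Int) ^ (PySem.Int.floordiv b 3).toNat with hstopdef
  by_cases hex : ∃ i : Int, i ^ 3 = n ∧ st ≤ i ∧ i < stp ∧ (2:Int) ∣ i - st
  · obtain ⟨i, hi3, hi1, hi2, hi4⟩ := hex
    rw [holScanA_pos n st stp i hi3 hi1 hi2 hi4]
    exact (holAlt_eq_pos n a b i ha hb hi3 hi1 hi2 hi4).symm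
  · rw [holScanA_neg n st stp (fun i hi3 hc => hex ⟨i, hi3, hc.1, hc.2.1, hc.2.2⟩)]
    exact (holAlt_eq_neg n a b ha hb
      (fun i hi3 hc => hex ⟨i, hi3, hc.1, hc.2.1, hc.2.2⟩)).symm
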